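-- pv_equiv track=rewrite | github.com/Wilply/IUT_M1209 | main.py | descendant
-- ===== SOURCE A (Python) =====
-- parente = [[1,3],[1,4],[0,1],[2,3],[2,4]] #liste pré-rempli pour teste
--
-- def whosyourchildreen(parent,ls=parente): #renvoir l'id des parents dans une liste
--     childreensid = []
--     for i in range(0,len(ls)):
--         if(ls[i][0] == parent):
--             childreensid.append(ls[i][1])
--     return childreensid
--
-- def descendant(parent,ls=parente):#renvoie une liste avec TOUT les descendant
--     descendanttab = []
--     generation = 0
--     loop = 0
--
--     descendanttab.append(whosyourchildreen(parent))
--     while(loop != 1):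
--         descendanttabgenplusun = []
--         for i in range(0,len(descendanttab[-1])):
--             descendanttabgenplusun.extend(whosyourchildreen(descendanttab[-1][i]))
--         descendanttab.append(descendanttabgenplusun)
--         generation = generation + 1
--         if(descendanttab[-1] == []):
--             descendanttab.remove([])
--             loop = 1
--     return descendanttab
-- ===== SOURCE B (Python) =====
-- parente = [[1,3],[1,4],[0,1],[2,3],[2,4]]  # same module-level table as A
--
-- # A's inner call `whosyourchildreen(parent)` omits ls, so A always reads the
-- # module constant `parente` and ignores its `ls` argument; B keeps that.
-- # B is recursive: the generation list of a node is its child list followed by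
-- # the level-wise merge (in child order) of each child's generation lists,
-- # which equals A's breadth-first generation order.
--
-- def _levels(node):
--     kids = [c for p, c in parente if p == node]
--     if not kids:
--         return []
--     out = [kids]
--     for k in kids:
--         for d, gen in enumerate(_levels(k), 1):
--             if d == len(out):
--                 out.append(list(gen))
--             else:
--                 out[d].extend(gen)
--     return out
--
-- def descendant(parent, ls=parente):
--     gens = _levels(parent)
--     return gens if gens else [[]]
-- ===== Notes on version B (the rewrite author's own statement) =====
-- stated objective: alternative
-- what changed: A iterates breadth-first, rescanning the whole parente table per node of each generation in a while loop (and, due to a defaulted inner call, ignores its ls argument, always using the module constant parente); B keeps that documented behaviour but is a depth-first recursion: the generation list of a node is its child list followed by the level-wise merge, in child order, of each child's recursively computed generation lists, returning [[]] when there are no children as A does.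
import Mathlib
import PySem

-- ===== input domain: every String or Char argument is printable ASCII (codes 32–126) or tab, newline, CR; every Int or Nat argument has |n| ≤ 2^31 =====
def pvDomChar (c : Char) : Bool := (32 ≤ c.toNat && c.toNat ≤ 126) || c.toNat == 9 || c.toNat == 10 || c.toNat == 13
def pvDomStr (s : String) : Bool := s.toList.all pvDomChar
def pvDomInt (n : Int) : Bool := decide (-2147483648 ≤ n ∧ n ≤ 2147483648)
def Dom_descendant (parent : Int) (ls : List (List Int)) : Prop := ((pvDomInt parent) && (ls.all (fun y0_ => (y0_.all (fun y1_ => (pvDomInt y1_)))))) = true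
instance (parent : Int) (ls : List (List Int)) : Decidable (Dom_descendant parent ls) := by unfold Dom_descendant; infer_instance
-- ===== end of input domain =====

-- B replaces A's iterative breadth-first rescanning loop by a depth-first recursion that
-- merges each child's generation lists level-wise; like A (whose inner call
-- `whosyourchildreen(parent)` omits ls), both ports ignore the `ls` argument and use `parente`.

-- ===== PORT A =====
-- module-level constant `parente`
def parenteA : List (List Int) := [[1,3],[1,4],[0,1],[2,3],[2,4]]

-- whosyourchildreen(parent) — always called with the default ls = parente inside descendant
def whosyourchildreenA (parent : Int) : List Int :=
  (PySem.List.pyRange 0 (Int.ofNat parenteA.length) 1).foldl (fun acc i =>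
    match PySem.List.pyGet? parenteA i with
    | some row =>
      match PySem.List.pyGet? row 0, PySem.List.pyGet? row 1 with
      | some a, some b => if a == parent then acc ++ [b] else acc
      | _, _ => acc
    | none => acc) []

-- the while(loop != 1) loop; fuel only makes the recursion total (it never runs out:
-- generations over the fixed 5-row parente empty after at most 3 steps)
def descLoopA (fuel : Nat) (tab : List (List Int)) : List (List Int) :=
  match fuel with
  | 0 => tab
  | fuel + 1 =>
    let last := (PySem.List.pyGet? tab (-1)).getD []
    let nextGen := (PySem.List.pyRange 0 (Int.ofNat last.length) 1).foldl (fun acc i =>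
      match PySem.List.pyGet? last i with
      | some c => acc ++ whosyourchildreenA c
      | none => acc) []
    let tab' := tab ++ [nextGen]
    if nextGen == [] then (PySem.List.remove? tab' ([] : List Int)).getD tab'
    else descLoopA fuel tab'

def descendant (parent : Int) (_ls : List (List Int)) : List (List Int) :=
  descLoopA 5 [whosyourchildreenA parent]

-- ===== PORT B =====
def parenteB : List (List Int) := [[1,3],[1,4],[0,1],[2,3],[2,4]]

-- kids = [c for p, c in parente if p == node]
def kidsB (node : Int) : List Int :=
  parenteB.foldl (fun acc row =>
    match row with
    | [p, c] => if p == node then acc ++ [c] else acc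
    | _ => acc) []

-- inner loop: for d, gen in enumerate(lv, 1): append or extend out[d]
def mergeB (out : List (List Int)) (lv : List (List Int)) : List (List Int) :=
  (lv.foldl (fun (st : List (List Int) × Nat) gen =>
    if st.2 == st.1.length then (st.1 ++ [gen], st.2 + 1)
    else (st.1.modify st.2 (· ++ gen), st.2 + 1)) (out, 1)).1

-- _levels(node); fuel only makes the recursion total (never exhausted over parente)
def levelsB (fuel : Nat) (node : Int) : List (List Int) :=
  match fuel with
  | 0 => []
  | fuel + 1 =>
    let kids := kidsB node
    if kids == [] then []
    else kids.foldl (fun out k => mergeB out (levelsB fuel k)) [kids]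

def descendant_alt (parent : Int) (_ls : List (List Int)) : List (List Int) :=
  let gens := levelsB 5 parent
  if gens == [] then [[]] else gens

-- ===== PRECONDITION & SPEC =====
def Spec_descendant (parent : Int) (ls : List (List Int)) (out : List (List Int)) : Prop := out = descendant_alt parent ls
instance (parent : Int) (ls : List (List Int)) (out : List (List Int)) : Decidable (Spec_descendant parent ls out) := by unfold Spec_descendant; infer_instance

-- ===== CLAIM (what is proved, stated in full; the proofs are below) =====
def Claim_equal_descendant : Prop := ∀ (parent : Int) (ls : List (List Int)), Dom_descendant parent ls → Spec_descendant parent ls (descendant parent ls)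

-- ===== LEMMAS AND PROOFS =====
lemma wsc_none (parent : Int) (h0 : parent ≠ 0) (h1 : parent ≠ 1) (h2 : parent ≠ 2) :
    whosyourchildreenA parent = [] := by
  have hr : PySem.List.pyRange 0 (Int.ofNat parenteA.length) 1 = [0, 1, 2, 3, 4] := by decide
  simp only [whosyourchildreenA, hr, List.foldl]
  norm_num [PySem.List.pyGet?, PySem.List.pyIdx?, parenteA]
  simp [Ne.symm h0, Ne.symm h1, Ne.symm h2]

lemma kidsB_none (parent : Int) (h0 : parent ≠ 0) (h1 : parent ≠ 1) (h2 : parent ≠ 2) :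
    kidsB parent = [] := by
  simp only [kidsB, parenteB, List.foldl]
  simp [Ne.symm h0, Ne.symm h1, Ne.symm h2]

lemma descendant_cases (parent : Int) (ls : List (List Int)) :
    descendant parent ls =
      if parent = 0 then [[1], [3, 4]]
      else if parent = 1 ∨ parent = 2 then [[3, 4]] else [[]] := by
  by_cases h0 : parent = 0
  · subst h0; simp only [descendant]; decide
  · by_cases h1 : parent = 1
    · subst h1; simp only [descendant]; decide
    · by_cases h2 : parent = 2
      · subst h2; simp only [descendant]; decide
      · simp only [h0, h1, h2, if_false, or_self]
        simp only [descendant, wsc_none parent h0 h1 h2]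
        decide

lemma descendant_alt_cases (parent : Int) (ls : List (List Int)) :
    descendant_alt parent ls =
      if parent = 0 then [[1], [3, 4]]
      else if parent = 1 ∨ parent = 2 then [[3, 4]] else [[]] := by
  by_cases h0 : parent = 0
  · subst h0; simp only [descendant_alt]; decide
  · by_cases h1 : parent = 1
    · subst h1; simp only [descendant_alt]; decide
    · by_cases h2 : parent = 2
      · subst h2; simp only [descendant_alt]; decide
      · simp only [h0, h1, h2, if_false, or_self]
        simp only [descendant_alt, levelsB, kidsB_none parent h0 h1 h2]
        decide

-- ===== VERDICT (by name: the statement is the Claim_ definition above) =====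
theorem descendant_spec : Claim_equal_descendant := by
  intro parent ls _
  unfold Spec_descendant
  rw [descendant_cases, descendant_alt_cases]
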